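-- pv_equiv track=rewrite | github.com/slee1717/M-mind-Solver | SamuelLee_Mastermind.py | Lvl4CompareGuess
-- ===== SOURCE A (Python) =====
-- def Lvl4CompareGuess(guess,possible,response):
--     new_set=[]
--     for x in possible:
--         tempResponse=[0,0]
--         for y in range(len(x)):
--             for z in range(len(guess)):
--                 if (x[y] == guess[z]):
--                     tempResponse[0]=tempResponse[0] + 1
--                     #else:
--                         #tempResponse[0]=tempResponse[0] + 1
--         if tempResponse[0] == response[0]:
--            new_set.append(x)
--     return new_set
-- ===== SOURCE B (Python) =====
-- def Lvl4CompareGuess(guess, possible, response):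
--     # frequency table of the guess, built once
--     cnt_g = {}
--     for s in guess:
--         cnt_g[s] = cnt_g.get(s, 0) + 1
--
--     def score(x):
--         # dot product of the two frequency vectors over x's distinct symbols
--         cnt_x = {}
--         for s in x:
--             cnt_x[s] = cnt_x.get(s, 0) + 1
--         return sum(c * cnt_g.get(s, 0) for s, c in cnt_x.items())
--
--     return [x for x in possible if score(x) == response[0]]
-- ===== Notes on version B (the rewrite author's own statement) =====
-- stated objective: faster
-- what changed: A counts matching position pairs with a double loop over all (y,z) index pairs per candidate; B precomputes a frequency table of the guess once and scores each candidate as a dot product of frequency vectors over its distinct symbols, then keeps candidates by a comprehension.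
import Mathlib
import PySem

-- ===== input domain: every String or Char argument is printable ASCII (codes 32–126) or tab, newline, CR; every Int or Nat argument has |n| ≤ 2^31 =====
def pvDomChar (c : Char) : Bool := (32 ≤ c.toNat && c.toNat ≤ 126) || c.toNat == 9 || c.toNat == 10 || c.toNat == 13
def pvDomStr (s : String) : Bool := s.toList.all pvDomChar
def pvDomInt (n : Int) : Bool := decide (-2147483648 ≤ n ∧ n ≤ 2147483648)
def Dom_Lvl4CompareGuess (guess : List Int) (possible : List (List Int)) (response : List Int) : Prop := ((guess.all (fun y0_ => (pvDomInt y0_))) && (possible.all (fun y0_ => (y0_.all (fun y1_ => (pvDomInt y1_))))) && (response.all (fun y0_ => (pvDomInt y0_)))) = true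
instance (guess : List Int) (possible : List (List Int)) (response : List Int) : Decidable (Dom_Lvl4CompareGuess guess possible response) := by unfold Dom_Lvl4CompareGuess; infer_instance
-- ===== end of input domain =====

-- B replaces A's per-candidate double loop over all position pairs with a guess
-- frequency table built once and a frequency-vector dot product per candidate (faster).


-- ===== PORT A =====
-- per-candidate work of A: tempResponse = [0,0], but only tempResponse[0] is ever
-- read or written, so it is carried as a single Int accumulator
def pvScoreA (guess x : List Int) : Int :=
  (PySem.List.pyRange 0 (PySem.List.len x)).foldl (fun t y =>
    (PySem.List.pyRange 0 (PySem.List.len guess)).foldl (fun t z =>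
      if PySem.List.pyGetD x y 0 = PySem.List.pyGetD guess z 0 then t + 1 else t) t) 0

def Lvl4CompareGuess (guess : List Int) (possible : List (List Int)) (response : List Int) : List (List Int) :=
  possible.foldl (fun new_set x =>
    if pvScoreA guess x = PySem.List.pyGetD response 0 0 then new_set ++ [x] else new_set) []

-- ===== PORT B =====
-- cnt[s] = cnt.get(s, 0) + 1 loop of Source B
def pvCounter (l : List Int) : PySem.Dict Int Int :=
  l.foldl (fun d s => d.insert s (d.getD s 0 + 1)) PySem.Dict.empty

-- Source B's score(x): dot product of frequency vectors over x's distinct symbols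
def pvScoreB (cg : PySem.Dict Int Int) (x : List Int) : Int :=
  ((pvCounter x).items.map (fun p => p.2 * cg.getD p.1 0)).sum

def Lvl4CompareGuess_alt (guess : List Int) (possible : List (List Int)) (response : List Int) : List (List Int) :=
  let cg := pvCounter guess
  possible.filter (fun x => pvScoreB cg x == PySem.List.pyGetD response 0 0)

-- ===== PRECONDITION & SPEC =====
-- Pre_ excludes exactly the inputs where the Pythons raise IndexError: response = []
-- while possible is non-empty (response[0] is then evaluated).
def Pre_Lvl4CompareGuess (guess : List Int) (possible : List (List Int)) (response : List Int) : Prop :=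
  possible = [] ∨ response ≠ []
instance (guess : List Int) (possible : List (List Int)) (response : List Int) : Decidable (Pre_Lvl4CompareGuess guess possible response) := by unfold Pre_Lvl4CompareGuess; infer_instance

def pvWitness_Lvl4CompareGuess : List Int × List (List Int) × List Int := ([1, 2], [[1, 2], [2, 0]], [1])

def Spec_Lvl4CompareGuess (guess : List Int) (possible : List (List Int)) (response : List Int) (out : List (List Int)) : Prop := out = Lvl4CompareGuess_alt guess possible response
instance (guess : List Int) (possible : List (List Int)) (response : List Int) (out : List (List Int)) : Decidable (Spec_Lvl4CompareGuess guess possible response out) := by unfold Spec_Lvl4CompareGuess; infer_instance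

-- ===== CLAIM (what is proved, stated in full; the proofs are below) =====
def Claim_equal_Lvl4CompareGuess : Prop := ∀ (guess : List Int) (possible : List (List Int)) (response : List Int), Dom_Lvl4CompareGuess guess possible response → Pre_Lvl4CompareGuess guess possible response → Spec_Lvl4CompareGuess guess possible response (Lvl4CompareGuess guess possible response)

-- ===== LEMMAS AND PROOFS =====

-- a sum of indicators over a duplicate-free list picks out the one hit
theorem pv_sum_indicator (s : List Int) (f : Int → Int) (a : Int)
    (hnd : s.Nodup) (ha : a ∈ s) :
    (s.map (fun k => if k = a then f k else 0)).sum = f a := by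
  induction s with
  | nil => cases ha
  | cons b t ih =>
    rcases List.nodup_cons.mp hnd with ⟨hb, hndt⟩
    rcases List.mem_cons.mp ha with h | h
    · subst h
      have ht : (t.map (fun k => if k = a then f k else 0)).sum = 0 := by
        apply List.sum_eq_zero
        intro v hv
        rcases List.mem_map.mp hv with ⟨k, hk, rfl⟩
        have : k ≠ a := fun h => hb (h ▸ hk)
        simp [this]
      simp [ht]
    · have hba : b ≠ a := fun e => hb (e ▸ h)
      simp [hba, ih hndt h]

-- dot product of frequency vectors over the distinct symbols = plain sum over the list
theorem pv_sum_count_mul (l : List Int) (s : List Int) (f : Int → Int)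
    (hnd : s.Nodup) (h : ∀ v ∈ l, v ∈ s) :
    (s.map (fun k => (l.count k : Int) * f k)).sum = (l.map f).sum := by
  induction l with
  | nil => simp
  | cons a t ih =>
    have hstep : (s.map (fun k => (((a :: t).count k : Nat) : Int) * f k)).sum
        = (s.map (fun k => ((t.count k : Nat) : Int) * f k)).sum
          + (s.map (fun k => if k = a then f k else 0)).sum := by
      rw [← PySem.List.sum_map_add_int]
      apply congrArg
      apply List.map_congr_left
      intro k _
      by_cases hk : k = a
      · subst hk; simp [List.count_cons_self]; ring
      · simp [List.count_cons, hk]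
        exact Or.inl (fun e => hk e.symm)
    have hmem : ∀ v ∈ t, v ∈ s := fun v hv => h v (List.mem_cons_of_mem a hv)
    rw [hstep, ih hmem, pv_sum_indicator s f a hnd (h a List.mem_cons_self)]
    simp [add_comm]

-- A's inner z-loop count, as a countP over the index range, is a plain count in guess
theorem pv_inner_count (guess : List Int) (v : Int) :
    (PySem.List.pyRange 0 (PySem.List.len guess)).countP
      (fun z => decide (v = PySem.List.pyGetD guess z 0)) = guess.count v := by
  conv_rhs => rw [← PySem.List.map_pyGetD_pyRange_zero guess 0]
  rw [List.count, List.countP_map]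
  apply List.countP_congr
  intro z _
  simp only [Function.comp, beq_iff_eq, decide_eq_true_eq]
  exact eq_comm

theorem pv_score_eq (guess x : List Int) : pvScoreA guess x = pvScoreB (pvCounter guess) x := by
  have hA : pvScoreA guess x = (x.map (fun v => (guess.count v : Int))).sum := by
    unfold pvScoreA
    simp only [PySem.List.foldl_ite_add_one]
    rw [PySem.List.foldl_add (PySem.List.pyRange 0 (PySem.List.len x))
      (fun y => ((PySem.List.pyRange 0 (PySem.List.len guess)).countP
        (fun z => decide (PySem.List.pyGetD x y 0 = PySem.List.pyGetD guess z 0)) : Int)) 0]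
    rw [zero_add]
    have hmap : (PySem.List.pyRange 0 (PySem.List.len x)).map
        (fun y => (((PySem.List.pyRange 0 (PySem.List.len guess)).countP
          (fun z => decide (PySem.List.pyGetD x y 0 = PySem.List.pyGetD guess z 0)) : Nat) : Int))
        = (PySem.List.pyRange 0 (PySem.List.len x)).map
        (fun y => ((guess.count (PySem.List.pyGetD x y 0) : Nat) : Int)) := by
      apply List.map_congr_left
      intro y _
      rw [pv_inner_count guess (PySem.List.pyGetD x y 0)]
    rw [hmap]
    conv_rhs => rw [← PySem.List.map_pyGetD_pyRange_zero x 0]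
    rw [List.map_map]
    rfl
  have hB : pvScoreB (pvCounter guess) x = (x.map (fun v => (guess.count v : Int))).sum := by
    unfold pvScoreB pvCounter
    rw [PySem.Dict.foldl_insert_getD_add_one_eq_counter,
        PySem.Dict.foldl_insert_getD_add_one_eq_counter,
        PySem.Dict.items_counter, List.map_map]
    have : ((fun p : Int × Int => p.2 * (PySem.Dict.counter guess).getD p.1 0) ∘
        fun k => (k, (x.count k : Int)))
        = fun k => (x.count k : Int) * (guess.count k : Int) := by
      funext k
      simp [Function.comp, PySem.Dict.getD_counter]
    rw [this]
    exact pv_sum_count_mul x (PySem.Set.ofList x) (fun k => (guess.count k : Int))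
      (PySem.Set.nodup_ofList x) (fun v hv => (PySem.Set.mem_ofList x v).mpr hv)
  rw [hA, hB]

-- ===== VERDICT (by name: the statement is the Claim_ definition above) =====
theorem Lvl4CompareGuess_spec : Claim_equal_Lvl4CompareGuess := by
  intro guess possible response _ _
  unfold Spec_Lvl4CompareGuess Lvl4CompareGuess Lvl4CompareGuess_alt
  rw [PySem.List.foldl_append_ite_eq_filter
    (p := fun x => pvScoreA guess x = PySem.List.pyGetD response 0 0)]
  simp only [List.nil_append]
  apply List.filter_congr
  intro x _
  rw [pv_score_eq]
  by_cases h : pvScoreB (pvCounter guess) x = PySem.List.pyGetD response 0 0 <;> simp [h]
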